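-- pv_equiv track=rewrite | github.com/Sabri-Nang/Ejercicios-Python- | Clase12/time_ordenamiento.py | buscar_max
-- ===== SOURCE A (Python) =====
-- def buscar_max(lista, a, b):
--     '''Devuelve la posición del máximo elemento en un segmento de
--     lista de elementos comparables.
--     La lista no debe ser vacía.
--     a y b son las posiciones inicial y final del segmento.'''
--
--     pos_max = a
--     comparacion = 0
--     for i in range(a + 1, b + 1):
--         if lista[i] > lista[pos_max]:
--             pos_max = i
--         comparacion += 1
--     return pos_max, comparacion
-- ===== SOURCE B (Python) =====
-- def buscar_max(lista, a, b):
--     '''Divide-and-conquer tournament: same position of the max (earliest on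
--     ties) and the same comparison count (b - a when a < b).'''
--     if a >= b:
--         return a, 0
--     mid = (a + b) // 2
--     lp, lc = buscar_max(lista, a, mid)
--     rp, rc = buscar_max(lista, mid + 1, b)
--     pos = rp if lista[rp] > lista[lp] else lp
--     return pos, lc + rc + 1
-- ===== Notes on version B (the rewrite author's own statement) =====
-- stated objective: alternative
-- what changed: Replaced the left-to-right linear scan with a recursive divide-and-conquer tournament that splits the segment at the midpoint and merges sub-results with a strict comparison (earlier index wins ties), adding one comparison per merge so the comparison count is identical.
import Mathlib
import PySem

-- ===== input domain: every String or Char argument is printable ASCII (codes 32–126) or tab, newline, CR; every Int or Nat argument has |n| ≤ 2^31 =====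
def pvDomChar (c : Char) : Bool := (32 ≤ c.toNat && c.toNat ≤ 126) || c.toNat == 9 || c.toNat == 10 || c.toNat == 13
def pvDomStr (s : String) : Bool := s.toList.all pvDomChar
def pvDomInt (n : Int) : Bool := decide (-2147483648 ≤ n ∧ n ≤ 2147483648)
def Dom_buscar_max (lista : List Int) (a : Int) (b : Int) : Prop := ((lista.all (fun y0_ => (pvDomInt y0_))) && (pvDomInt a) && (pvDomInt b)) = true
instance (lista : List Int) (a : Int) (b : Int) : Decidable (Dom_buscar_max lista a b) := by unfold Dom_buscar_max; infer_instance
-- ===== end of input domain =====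

-- B replaces A's linear scan by a divide-and-conquer tournament (same position, same comparison count): alternative decomposition, same cost.
-- ===== PORT A =====
def buscar_max (lista : List Int) (a : Int) (b : Int) : Int × Int :=
  (PySem.List.pyRange (a + 1) (b + 1) 1).foldl
    (fun s i =>
      ((if PySem.List.pyGetD lista i 0 > PySem.List.pyGetD lista s.1 0 then i else s.1), s.2 + 1))
    (a, 0)

-- ===== PORT B =====
def buscar_max_alt (lista : List Int) (a : Int) (b : Int) : Int × Int :=
  if hab : a ≥ b then (a, 0)
  else
    let mid := PySem.Int.floordiv (a + b) 2
    let l := buscar_max_alt lista a mid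
    let r := buscar_max_alt lista (mid + 1) b
    ((if PySem.List.pyGetD lista r.1 0 > PySem.List.pyGetD lista l.1 0 then r.1 else l.1),
     l.2 + r.2 + 1)
  termination_by (b - a).toNat
  decreasing_by
  · have h2 : PySem.Int.floordiv (a + b) 2 < b := by
      rw [PySem.Int.floordiv_lt_iff_lt_mul (by omega)]; omega
    omega
  · have h1 := (PySem.Int.floordiv_two_mid_bounds (le_of_lt (lt_of_not_ge hab))).1
    omega

-- ===== PRECONDITION & SPEC =====
-- Pre_: exactly the inputs where Python's A returns (otherwise some lista[i], a ≤ i ≤ b, raises IndexError)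
def Pre_buscar_max (lista : List Int) (a : Int) (b : Int) : Prop :=
  b ≤ a ∨ (-(lista.length : Int) ≤ a ∧ b < (lista.length : Int))
instance (lista : List Int) (a : Int) (b : Int) : Decidable (Pre_buscar_max lista a b) := by
  unfold Pre_buscar_max; infer_instance
def pvWitness_buscar_max : List Int × Int × Int := ([3, 7, 7, 2], 0, 3)

def Spec_buscar_max (lista : List Int) (a : Int) (b : Int) (out : Int × Int) : Prop := out = buscar_max_alt lista a b
instance (lista : List Int) (a : Int) (b : Int) (out : Int × Int) : Decidable (Spec_buscar_max lista a b out) := by unfold Spec_buscar_max; infer_instance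

-- ===== CLAIM (what is proved, stated in full; the proofs are below) =====
def Claim_equal_buscar_max : Prop := ∀ (lista : List Int) (a : Int) (b : Int), Dom_buscar_max lista a b → Pre_buscar_max lista a b → Spec_buscar_max lista a b (buscar_max lista a b)

-- ===== LEMMAS AND PROOFS =====

-- canonical right-peel recursion for "first position of the max of lista[a..b], with b-a comparisons"
def gseg (lista : List Int) (a : Int) (b : Int) : Int × Int :=
  if hab : a ≥ b then (a, 0)
  else
    let p := gseg lista a (b - 1)
    ((if PySem.List.pyGetD lista b 0 > PySem.List.pyGetD lista p.1 0 then b else p.1), p.2 + 1)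
  termination_by (b - a).toNat
  decreasing_by omega

def gmerge (lista : List Int) (x y : Int × Int) : Int × Int :=
  ((if PySem.List.pyGetD lista y.1 0 > PySem.List.pyGetD lista x.1 0 then y.1 else x.1),
   x.2 + y.2 + 1)

theorem gseg_base (lista : List Int) (a b : Int) (h : a ≥ b) : gseg lista a b = (a, 0) := by
  rw [gseg]; rw [dif_pos h]

theorem gseg_step (lista : List Int) (a b : Int) (h : a < b) :
    gseg lista a b = gmerge lista (gseg lista a (b - 1)) (b, 0) := by
  rw [gseg]; rw [dif_neg (not_le.mpr h)]; simp [gmerge]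

theorem gmerge_assoc (lista : List Int) (x y z : Int × Int) :
    gmerge lista x (gmerge lista y z) = gmerge lista (gmerge lista x y) z := by
  unfold gmerge
  rcases x with ⟨xp, xc⟩; rcases y with ⟨yp, yc⟩; rcases z with ⟨zp, zc⟩
  simp only [Prod.mk.injEq]
  refine ⟨?_, by omega⟩
  split_ifs <;> omega

theorem gseg_split (lista : List Int) :
    ∀ n a m b, (b - m).toNat = n → a ≤ m → m < b →
      gmerge lista (gseg lista a m) (gseg lista (m + 1) b) = gseg lista a b := by
  intro n
  induction n using Nat.strong_induction_on with
  | _ n ih =>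
    intro a m b hn ham hmb
    by_cases hend : m + 1 = b
    · subst hend
      rw [gseg_base lista (m + 1) (m + 1) le_rfl,
          gseg_step lista a (m + 1) (by omega)]
      simp
    · have hlt : m + 1 < b := by omega
      rw [gseg_step lista (m + 1) b hlt, gmerge_assoc,
          ih ((b - 1) - m).toNat (by omega) a m (b - 1) rfl ham (by omega),
          gseg_step lista a b (by omega)]

theorem buscar_eq_gseg (lista : List Int) :
    ∀ n a b, (b - a).toNat = n → buscar_max lista a b = gseg lista a b := by
  intro n
  induction n using Nat.strong_induction_on with
  | _ n ih =>
    intro a b hn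
    by_cases h : a ≥ b
    · rw [gseg_base lista a b h]
      unfold buscar_max
      rw [PySem.List.pyRange_one_eq_nil (by omega)]
      rfl
    · have hab : a < b := lt_of_not_ge h
      unfold buscar_max
      rw [show b + 1 = (b - 1 + 1) + 1 by ring,
          PySem.List.pyRange_one_succ_right (by omega), List.foldl_append]
      have : (PySem.List.pyRange (a + 1) (b - 1 + 1) 1).foldl
          (fun s i => ((if PySem.List.pyGetD lista i 0 > PySem.List.pyGetD lista s.1 0 then i else s.1), s.2 + 1))
          (a, 0) = buscar_max lista a (b - 1) := rfl
      rw [this, ih ((b - 1) - a).toNat (by omega) a (b - 1) rfl,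
          gseg_step lista a b hab]
      simp only [List.foldl_cons, List.foldl_nil]
      have heq : b - 1 + 1 = b := by ring
      rw [heq]
      simp [gmerge]

theorem alt_eq_gseg (lista : List Int) :
    ∀ n a b, (b - a).toNat = n → buscar_max_alt lista a b = gseg lista a b := by
  intro n
  induction n using Nat.strong_induction_on with
  | _ n ih =>
    intro a b hn
    by_cases h : a ≥ b
    · rw [gseg_base lista a b h]; rw [buscar_max_alt]; rw [dif_pos h]
    · have hab : a < b := lt_of_not_ge h
      have hm := PySem.Int.floordiv_two_mid_bounds (le_of_lt hab)
      rw [buscar_max_alt]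
      rw [dif_neg (not_le.mpr hab)]
      dsimp only
      have hmid : PySem.Int.floordiv (a + b) 2 < b := by
        rw [PySem.Int.floordiv_lt_iff_lt_mul (by omega)]; omega
      rw [ih (PySem.Int.floordiv (a + b) 2 - a).toNat (by omega) a _ rfl,
          ih (b - (PySem.Int.floordiv (a + b) 2 + 1)).toNat (by omega) _ b rfl]
      exact gseg_split lista (b - PySem.Int.floordiv (a + b) 2).toNat a _ b rfl hm.1 hmid

-- ===== VERDICT (by name: the statement is the Claim_ definition above) =====
theorem buscar_max_spec : Claim_equal_buscar_max := by
  intro lista a b _ _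
  unfold Spec_buscar_max
  rw [buscar_eq_gseg lista (b - a).toNat a b rfl, alt_eq_gseg lista (b - a).toNat a b rfl]
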